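-- pv_equiv track=rewrite | github.com/AviParrack/Soothcheck | data/NTML-datasets/generation-scripts/formatters.py | _create_numbered_response
-- ===== SOURCE A (Python) =====
-- from typing import List, Dict, Tuple, Any
--
-- def _create_numbered_response(statements: List[Dict]) -> Tuple[str, List[Tuple[int, int]]]:
--     """Create numbered list response with position tracking.
--
--     Args:
--         statements: List of statement dictionaries
--
--     Returns:
--         Tuple of (formatted_response, position_list)
--         where position_list contains (char_start, char_end) for each statement
--     """
--     lines = []
--     positions = []
--     current_pos = 0
--
--     for i, stmt in enumerate(statements, 1):
--         statement_text = stmt['statement'].strip()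
--
--         # Create numbered line
--         line = f"{i}. {statement_text}"
--
--         # Calculate positions for the statement text (excluding number and period)
--         number_prefix = f"{i}. "
--         statement_start = current_pos + len(number_prefix)
--         statement_end = statement_start + len(statement_text)
--
--         positions.append((statement_start, statement_end))
--         lines.append(line)
--
--         # Update position for next line (including newline if not last)
--         current_pos += len(line)
--         if i < len(statements):
--             current_pos += 1  # for newline character
--
--     response = "\n".join(lines)
--     return response, positions
-- ===== SOURCE B (Python) =====
-- def _create_numbered_response(statements):
--     """Back-to-front construction: build the result for the suffix, then prepend each
--     line, shifting every already-computed position by the new line's width + newline."""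
--     lines = []
--     positions = []
--     for i in range(len(statements), 0, -1):
--         text = statements[i - 1]['statement'].strip()
--         prefix = f"{i}. "
--         line = prefix + text
--         shift = len(line) + 1
--         positions = [(len(prefix), len(prefix) + len(text))] + \
--                     [(a + shift, b + shift) for (a, b) in positions]
--         lines = [line] + lines
--     return "\n".join(lines), positions
-- ===== Notes on version B (the rewrite author's own statement) =====
-- stated objective: alternative
-- what changed: A builds forward carrying a running char offset; B builds the answer back-to-front: it constructs the suffix's lines/positions first and, when prepending each line, re-shifts every already-computed position by that line's width plus the newline, so no running offset exists.
import Mathlib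
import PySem

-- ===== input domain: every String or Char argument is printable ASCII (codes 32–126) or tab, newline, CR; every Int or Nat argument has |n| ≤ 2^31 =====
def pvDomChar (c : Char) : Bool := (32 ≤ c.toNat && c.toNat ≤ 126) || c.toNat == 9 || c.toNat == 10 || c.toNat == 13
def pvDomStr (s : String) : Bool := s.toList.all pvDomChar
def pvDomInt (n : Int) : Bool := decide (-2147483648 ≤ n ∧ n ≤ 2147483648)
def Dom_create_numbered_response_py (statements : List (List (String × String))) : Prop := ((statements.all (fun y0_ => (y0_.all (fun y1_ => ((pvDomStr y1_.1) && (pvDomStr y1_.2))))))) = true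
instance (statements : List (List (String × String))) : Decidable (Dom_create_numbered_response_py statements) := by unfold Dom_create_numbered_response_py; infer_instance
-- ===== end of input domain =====

-- B replaces A's forward loop with a running char offset by a back-to-front construction that
-- shifts the suffix's already-computed positions at each prepend; same return value (alternative, not faster).


-- ===== PORT A =====
-- stmt['statement'] on the association list: first matching key (Pre_ guarantees the key is present;
-- the "" default is never reached inside Pre_).
def pvLookupStatement (stmt : List (String × String)) : String :=
  (((stmt.find? (fun q => q.1 == "statement")).map (·.2)).getD "")

-- A's loop body (the for-loop of _create_numbered_response), n = len(statements) for the guard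
def pvStepA (n : Int) (st : List String × List (Int × Int) × Int)
    (p : Int × List (String × String)) : List String × List (Int × Int) × Int :=
  let statement_text := PySem.Str.strip (pvLookupStatement p.2)
  let line := PySem.Int.toStr p.1 ++ ". " ++ statement_text
  let number_prefix := PySem.Int.toStr p.1 ++ ". "
  let statement_start := st.2.2 + PySem.Str.len number_prefix
  let statement_end := statement_start + PySem.Str.len statement_text
  (st.1 ++ [line], st.2.1 ++ [(statement_start, statement_end)],
   st.2.2 + PySem.Str.len line + (if p.1 < n then 1 else 0))

def create_numbered_response_py (statements : List (List (String × String))) : String × (List (Int × Int)) :=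
  let res := (PySem.List.enumerate statements 1).foldl
    (pvStepA (statements.length : Int)) ([], [], 0)
  (PySem.Str.join "\n" res.1, res.2.1)

-- ===== PORT B =====
-- B's loop body: iterating i from len(statements) down to 1 and prepending is a foldr over
-- enumerate(statements, 1); each step shifts every already-computed tail position.
def pvStepB (p : Int × List (String × String))
    (acc : List String × List (Int × Int)) : List String × List (Int × Int) :=
  let text := PySem.Str.strip (pvLookupStatement p.2)
  let pfx := PySem.Int.toStr p.1 ++ ". "
  let line := pfx ++ text
  let shift := PySem.Str.len line + 1
  ([line] ++ acc.1,
   [(PySem.Str.len pfx, PySem.Str.len pfx + PySem.Str.len text)]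
     ++ acc.2.map (fun q => (q.1 + shift, q.2 + shift)))

def create_numbered_response_py_alt (statements : List (List (String × String))) : String × (List (Int × Int)) :=
  let res := (PySem.List.enumerate statements 1).foldr pvStepB ([], [])
  (PySem.Str.join "\n" res.1, res.2)

-- ===== PRECONDITION & SPEC =====
-- Pre_ excludes exactly the inputs where some dict lacks the key 'statement':
-- there Python A raises KeyError (returns no value), and B raises the same KeyError.
def Pre_create_numbered_response_py (statements : List (List (String × String))) : Prop :=
  (statements.all (fun stmt => stmt.any (fun q => q.1 == "statement"))) = true
instance (statements : List (List (String × String))) : Decidable (Pre_create_numbered_response_py statements) := by unfold Pre_create_numbered_response_py; infer_instance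

def pvWitness_create_numbered_response_py : (List (List (String × String))) :=
  [[("statement", " hi ")], [("statement", "yo"), ("other", "x")]]

def Spec_create_numbered_response_py (statements : List (List (String × String))) (out : String × (List (Int × Int))) : Prop := out = create_numbered_response_py_alt statements
instance (statements : List (List (String × String))) (out : String × (List (Int × Int))) : Decidable (Spec_create_numbered_response_py statements out) := by unfold Spec_create_numbered_response_py; infer_instance

-- ===== CLAIM (what is proved, stated in full; the proofs are below) =====
def Claim_equal_create_numbered_response_py : Prop := ∀ (statements : List (List (String × String))), Dom_create_numbered_response_py statements → Pre_create_numbered_response_py statements → Spec_create_numbered_response_py statements (create_numbered_response_py statements)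

-- ===== LEMMAS AND PROOFS =====

-- the numbered line for (i, text)
def pvLine (p : Int × String) : String := PySem.Int.toStr p.1 ++ ". " ++ p.2

-- specification of the position list, recursive over the texts with 1-based index i and base offset c
def pvPos : List String → Int → Int → List (Int × Int)
  | [], _, _ => []
  | t :: ts, i, c =>
      (c + PySem.Str.len (PySem.Int.toStr i ++ ". "),
       c + PySem.Str.len (PySem.Int.toStr i ++ ". ") + PySem.Str.len t)
      :: pvPos ts (i + 1) (c + PySem.Str.len (PySem.Int.toStr i ++ ". ") + PySem.Str.len t + 1)

lemma pvFoldA (ts : List (List (String × String))) :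
    ∀ (i c : Int) (L : List String) (P : List (Int × Int)) (n : Int),
    i + ts.length = n + 1 →
    ((PySem.List.enumerate ts i).foldl (pvStepA n) (L, P, c)).1
        = L ++ (PySem.List.enumerate ts i).map
            (fun p => pvLine (p.1, PySem.Str.strip (pvLookupStatement p.2))) ∧
    ((PySem.List.enumerate ts i).foldl (pvStepA n) (L, P, c)).2.1
        = P ++ pvPos (ts.map (fun s => PySem.Str.strip (pvLookupStatement s))) i c := by
  induction ts with
  | nil => intro i c L P n _; simp [PySem.List.enumerate_nil, pvPos]
  | cons s rest ih =>
    intro i c L P n hn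
    rw [PySem.List.enumerate_cons]
    simp only [List.foldl_cons]
    rcases rest with _ | ⟨s2, rest2⟩
    · simp only [PySem.List.enumerate_nil, List.foldl_nil, pvStepA, pvPos, List.map_cons,
        List.map_nil, PySem.List.enumerate_nil]
      constructor
      · simp [pvLine]
      · simp
    · have hlen : PySem.Str.len (PySem.Int.toStr i ++ ". " ++ PySem.Str.strip (pvLookupStatement s))
          = PySem.Str.len (PySem.Int.toStr i ++ ". ") + PySem.Str.len (PySem.Str.strip (pvLookupStatement s)) :=
        PySem.Str.len_append _ _
      have hguard : i < n := by
        simp only [List.length_cons] at hn; push_cast at hn; omega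
      have := ih (i + 1)
        (c + PySem.Str.len (PySem.Int.toStr i ++ ". ") + PySem.Str.len (PySem.Str.strip (pvLookupStatement s)) + 1)
        (L ++ [pvLine (i, PySem.Str.strip (pvLookupStatement s))])
        (P ++ [(c + PySem.Str.len (PySem.Int.toStr i ++ ". "),
                c + PySem.Str.len (PySem.Int.toStr i ++ ". ") + PySem.Str.len (PySem.Str.strip (pvLookupStatement s)))])
        n (by simp only [List.length_cons] at hn ⊢; push_cast at hn ⊢; omega)
      simp only [pvStepA, if_pos hguard, pvLine, hlen,
        show ∀ a b : Int, c + (a + b) + 1 = c + a + b + 1 from fun a b => by ring] at this ⊢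
      constructor
      · rw [this.1]; simp [List.map_cons]
      · rw [this.2]; simp [pvPos]

-- shifting a position block moves its base offset
lemma pvPosShift (ts : List String) :
    ∀ (i c d : Int), (pvPos ts i c).map (fun q => (q.1 + d, q.2 + d)) = pvPos ts i (c + d) := by
  induction ts with
  | nil => intro i c d; simp [pvPos]
  | cons t ts ih =>
    intro i c d
    simp only [pvPos, List.map_cons, List.cons.injEq]
    refine ⟨by rw [Prod.mk.injEq]; constructor <;> ring, ?_⟩
    rw [ih]
    congr 1; ring

-- B's backward fold produces the lines and the (absolute) position spec
set_option maxHeartbeats 1000000 in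
lemma pvFoldB (ts : List (List (String × String))) :
    ∀ (i : Int),
    ((PySem.List.enumerate ts i).foldr pvStepB ([], [])).1
        = (PySem.List.enumerate ts i).map
            (fun p => pvLine (p.1, PySem.Str.strip (pvLookupStatement p.2))) ∧
    ((PySem.List.enumerate ts i).foldr pvStepB ([], [])).2
        = pvPos (ts.map (fun s => PySem.Str.strip (pvLookupStatement s))) i 0 := by
  induction ts with
  | nil => intro i; simp [PySem.List.enumerate_nil, pvPos]
  | cons s rest ih =>
    intro i
    rw [PySem.List.enumerate_cons]
    simp only [List.foldr_cons]
    have hlen : PySem.Str.len (PySem.Int.toStr i ++ ". " ++ PySem.Str.strip (pvLookupStatement s))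
        = PySem.Str.len (PySem.Int.toStr i ++ ". ") + PySem.Str.len (PySem.Str.strip (pvLookupStatement s)) :=
      PySem.Str.len_append _ _
    simp only [pvStepB, (ih (i + 1)).1, (ih (i + 1)).2, List.map_cons, pvPos, pvLine,
      List.singleton_append, List.cons.injEq]
    refine ⟨trivial, ?_, ?_⟩
    · rw [Prod.mk.injEq]
      exact ⟨by omega, by omega⟩
    · rw [pvPosShift]
      congr 1
      rw [hlen]; ring

-- ===== VERDICT (by name: the statement is the Claim_ definition above) =====
theorem create_numbered_response_py_spec : Claim_equal_create_numbered_response_py := by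
  intro statements _ _
  unfold Spec_create_numbered_response_py
  simp only [create_numbered_response_py, create_numbered_response_py_alt]
  have hA := pvFoldA statements 1 0 [] [] (statements.length : Int) (by ring)
  have hB := pvFoldB statements 1
  rw [hA.1, hA.2, hB.1, hB.2]
  simp
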